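-- pv_equiv track=rewrite | github.com/jasn-armstrng/hackinscience-problems-solutions | dyck_words.py | is_a_dyck_word
-- ===== SOURCE A (Python) =====
-- def generate_openers_and_closers(word: str) -> tuple:
--     # Create an empty list to store the unique characters we find in the word
--     unique_chars = []
--
--     # Iterate through each character in the word
--     for char in word:
--         # If we haven't seen this character before, add it to our list of unique characters
--         if char not in unique_chars:
--             unique_chars.append(char)
--
--     # Find the midpoint of our list of unique characters. We'll use this to split the list into 'openers' and 'closers'
--     mid_index = len(unique_chars) // 2
--
--     # The 'openers' are the first half of the unique characters
--     openers = unique_chars[:mid_index]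
--     # The 'closers' are the second half of the unique characters
--     closers = unique_chars[mid_index:]
--
--     # Return our 'openers' and 'closers'
--     return (openers, closers)
--
-- def is_a_dyck_word(word: str) -> bool:
--     """
--     Determines if a given word is a Dyck word.
--     A Dyck word is a sequence of characters (typically brackets) that is well-formed;
--     i.e., each opening bracket has a corresponding closing bracket, and they are correctly nested.
--
--     Args:
--         word (str): A string of brackets.
--
--     Returns:
--         bool: True if the word is a Dyck word (i.e., all brackets are correctly matched and nested); False otherwise.
--     """
--     openers, closers = generate_openers_and_closers(word)
--
--     # Initialize an empty list as a stack
--     stack: list = []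
--
--     for char in word:
--         if char in openers:
--             stack.append(char)
--         elif len(stack) > 0 and char in closers:
--             stack.pop()
--         else:
--             return False  # Handles no matches in openers
--
--     # If all openers and closers have been correctly matched and nested, the stack should now be empty
--     # If it is, return True to indicate that the word is a Dyck word
--     # If it's not (i.e., there are un-matched opening brackets remaining), return False
--     return len(stack) == 0
-- ===== SOURCE B (Python) =====
-- def is_a_dyck_word(word: str) -> bool:
--     # Divide-and-conquer (alternative algorithm): reduce each half of the word
--     # to its irreducible form
--     # ")" * c + "(" * o, counted as a pair (c, o), and merge the halves by
--     # cancelling the left half's unmatched openers against the right half's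
--     # unmatched closers. The word is a Dyck word iff the whole reduces to (0, 0).
--     unique = list(dict.fromkeys(word))
--     openers = set(unique[:len(unique) // 2])
--
--     def reduce(lo: int, hi: int):
--         # (unmatched closers, unmatched openers) of word[lo:hi], hi - lo >= 1
--         if hi - lo == 1:
--             return (0, 1) if word[lo] in openers else (1, 0)
--         mid = (lo + hi) // 2
--         c1, o1 = reduce(lo, mid)
--         c2, o2 = reduce(mid, hi)
--         matched = min(o1, c2)
--         return (c1 + c2 - matched, o1 + o2 - matched)
--
--     return word == "" or reduce(0, len(word)) == (0, 0)
-- ===== Notes on version B (the rewrite author's own statement) =====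
-- stated objective: alternative
-- what changed: B replaces A's sequential stack scan (with list-membership tests and an O(n*u) unique-chars pass) by a divide-and-conquer reduction: each half of the word is reduced to a pair (unmatched closers, unmatched openers) and the pairs are merged by cancellation; the word is a Dyck word iff the whole reduces to (0,0).
import Mathlib
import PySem

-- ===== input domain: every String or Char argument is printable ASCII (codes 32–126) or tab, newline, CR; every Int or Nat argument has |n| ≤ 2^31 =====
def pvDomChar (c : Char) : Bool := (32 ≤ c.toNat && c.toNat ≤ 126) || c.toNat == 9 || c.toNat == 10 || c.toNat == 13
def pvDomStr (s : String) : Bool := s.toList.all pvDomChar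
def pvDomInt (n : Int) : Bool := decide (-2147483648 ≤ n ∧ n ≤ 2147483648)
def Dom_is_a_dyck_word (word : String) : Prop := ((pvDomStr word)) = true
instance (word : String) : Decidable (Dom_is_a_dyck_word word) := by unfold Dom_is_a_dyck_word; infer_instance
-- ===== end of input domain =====

-- B is an alternative algorithm: instead of A's sequential stack scan, a divide-and-conquer
-- reduction of each half to a (unmatched closers, unmatched openers) pair, merged by cancellation.

-- ===== PORT A =====
-- generate_openers_and_closers: unique_chars built by scanning the accumulator;
-- slices unique_chars[:mid] / unique_chars[mid:] with mid = len // 2 ≥ 0 are exactly take/drop.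
def pvGenOpenClose (word : String) : List Char × List Char :=
  let uniqueChars := word.toList.foldl
    (fun acc c => if acc.contains c then acc else acc ++ [c]) []
  let midIndex := uniqueChars.length / 2
  (uniqueChars.take midIndex, uniqueChars.drop midIndex)

-- the for-loop of A: stack of chars, append = ++ [c], pop() = dropLast, early return False
def pvLoopA (openers closers : List Char) : List Char → List Char → Bool
  | stack, [] => stack.length == 0
  | stack, c :: cs =>
      if openers.contains c then pvLoopA openers closers (stack ++ [c]) cs
      else if decide (stack.length > 0) && closers.contains c then
        pvLoopA openers closers stack.dropLast cs
      else false

def is_a_dyck_word (word : String) : Bool :=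
  let oc := pvGenOpenClose word
  pvLoopA oc.1 oc.2 [] word.toList

-- ===== PORT B =====
-- reduce(lo, hi) of Source B: counts of (unmatched closers, unmatched openers) of word[lo:hi].
-- Counts are Nat: Python's values are nonnegative (matched = min(o1, c2) ≤ c2 and ≤ o1),
-- so Nat subtraction is exact here; word[lo] with 0 ≤ lo < len(word) is getD (exact there).
-- Fuel (first argument) only makes the recursion total: hi - lo ≥ 1 halves at each level,
-- so fuel = hi - lo suffices; Python's recursion terminates on the same call tree.
def pvReduceB (w : List Char) (openers : PySem.Set Char) : Nat → Nat → Nat → Nat × Nat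
  | 0, _, _ => (0, 0)  -- unreachable when fuel ≥ hi - lo ≥ 1
  | fuel + 1, lo, hi =>
      if hi - lo = 1 then
        if PySem.Set.contains openers (w.getD lo ' ') then (0, 1) else (1, 0)
      else
        let mid := (lo + hi) / 2
        let p1 := pvReduceB w openers fuel lo mid
        let p2 := pvReduceB w openers fuel mid hi
        let matched := min p1.2 p2.1
        (p1.1 + p2.1 - matched, p1.2 + p2.2 - matched)

def is_a_dyck_word_alt (word : String) : Bool :=
  let unique := PySem.List.dedup word.toList
  let openers := PySem.Set.ofList (unique.take (unique.length / 2))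
  word == "" || (pvReduceB word.toList openers word.toList.length 0 word.toList.length == (0, 0))

-- ===== PRECONDITION & SPEC =====
def Spec_is_a_dyck_word (word : String) (out : Bool) : Prop := out = is_a_dyck_word_alt word
instance (word : String) (out : Bool) : Decidable (Spec_is_a_dyck_word word out) := by unfold Spec_is_a_dyck_word; infer_instance

-- ===== CLAIM (what is proved, stated in full; the proofs are below) =====
def Claim_equal_is_a_dyck_word : Prop := ∀ (word : String), Dom_is_a_dyck_word word → Spec_is_a_dyck_word word (is_a_dyck_word word)

-- ===== LEMMAS AND PROOFS =====

-- sequential one-character step: what appending one character does to a (closers, openers) pair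
def pvStep (openers : PySem.Set Char) (s : Nat × Nat) (c : Char) : Nat × Nat :=
  if PySem.Set.contains openers c then (s.1, s.2 + 1)
  else if s.2 > 0 then (s.1, s.2 - 1) else (s.1 + 1, s.2)

-- the merge used by B's reduce
def pvMerge (a b : Nat × Nat) : Nat × Nat :=
  (a.1 + b.1 - min a.2 b.1, a.2 + b.2 - min a.2 b.1)

lemma pv_unique_eq (l : List Char) :
    l.foldl (fun acc c => if acc.contains c then acc else acc ++ [c]) [] =
      PySem.List.dedup l := by
  rw [PySem.List.dedup_eq_ofList, PySem.Set.ofList_eq_foldl]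
  rfl

lemma pv_merge_assoc (a b c : Nat × Nat) :
    pvMerge (pvMerge a b) c = pvMerge a (pvMerge b c) := by
  obtain ⟨a1, a2⟩ := a; obtain ⟨b1, b2⟩ := b; obtain ⟨c1, c2⟩ := c
  simp only [pvMerge, Prod.mk.injEq]
  omega

lemma pv_step_eq_merge (op : PySem.Set Char) (s : Nat × Nat) (c : Char) :
    pvStep op s c = pvMerge s (pvStep op (0, 0) c) := by
  obtain ⟨s1, s2⟩ := s
  simp only [pvStep, pvMerge]
  split_ifs <;> first | (simp_all; omega) | simp_all

lemma pv_foldl_merge (op : PySem.Set Char) (ys : List Char) (s : Nat × Nat) :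
    ys.foldl (pvStep op) s = pvMerge s (ys.foldl (pvStep op) (0, 0)) := by
  induction ys generalizing s with
  | nil =>
      obtain ⟨s1, s2⟩ := s
      simp [pvMerge]
  | cons y ys ih =>
      simp only [List.foldl_cons]
      rw [ih (pvStep op s y), ih (pvStep op (0, 0) y),
        pv_step_eq_merge op s y, pv_merge_assoc]

lemma pv_foldl_append (op : PySem.Set Char) (xs ys : List Char) :
    (xs ++ ys).foldl (pvStep op) (0, 0) =
      pvMerge (xs.foldl (pvStep op) (0, 0)) (ys.foldl (pvStep op) (0, 0)) := by
  rw [List.foldl_append, pv_foldl_merge]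

-- first component never decreases along the fold
lemma pv_foldl_fst_mono (op : PySem.Set Char) (cs : List Char) (s : Nat × Nat) :
    s.1 ≤ (cs.foldl (pvStep op) s).1 := by
  induction cs generalizing s with
  | nil => exact le_refl _
  | cons c cs ih =>
      refine le_trans ?_ (ih (pvStep op s c))
      simp only [pvStep]
      split_ifs <;> simp

-- B's reduce computes the sequential fold of its segment
lemma pv_reduce_eq (w : List Char) (op : PySem.Set Char) :
    ∀ fuel lo hi, lo < hi → hi ≤ w.length → hi - lo ≤ fuel →
      pvReduceB w op fuel lo hi =
        ((w.drop lo).take (hi - lo)).foldl (pvStep op) (0, 0) := by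
  intro fuel
  induction fuel with
  | zero => intro lo hi h1 _ h3; omega
  | succ fuel ih =>
      intro lo hi h1 h2 h3
      by_cases hbase : hi - lo = 1
      · have hlo : lo < w.length := by omega
        simp only [pvReduceB, hbase]
        rw [List.take_one, List.head?_drop]
        simp only [List.getElem?_eq_getElem hlo, Option.toList_some]
        rw [List.getD_eq_getElem w ' ' hlo]
        simp [List.foldl_cons, pvStep]
      · have h2lt : lo + 2 ≤ hi := by omega
        simp only [pvReduceB, if_neg hbase]
        set mid := (lo + hi) / 2 with hmid
        have hm1 : lo < mid := by omega
        have hm2 : mid < hi := by omega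
        rw [ih lo mid hm1 (by omega) (by omega), ih mid hi hm2 h2 (by omega)]
        have hd : (w.drop lo).drop (mid - lo) = w.drop mid := by
          rw [List.drop_drop]
          congr 1
          omega
        have hsplit : (w.drop lo).take (hi - lo) =
            (w.drop lo).take (mid - lo) ++ (w.drop mid).take (hi - mid) := by
          rw [show hi - lo = (mid - lo) + (hi - mid) by omega, List.take_add, hd]
        rw [hsplit, pv_foldl_append]
        rfl

-- A's loop from a stack of depth d equals "the fold from (0, d) ends at (0, 0)"
lemma pv_loopA_eq (u : List Char) (cs : List Char) (stack : List Char)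
    (h : ∀ c ∈ cs, c ∈ u) :
    pvLoopA (u.take (u.length / 2)) (u.drop (u.length / 2)) stack cs =
      decide (cs.foldl (pvStep (PySem.Set.ofList (u.take (u.length / 2)))) (0, stack.length) = (0, 0)) := by
  induction cs generalizing stack with
  | nil =>
      simp only [pvLoopA, List.foldl_nil]
      rw [Bool.eq_iff_iff]
      simp [Prod.ext_iff]
  | cons c cs ih =>
      have hcu : c ∈ u := h c (by simp)
      have hrest : ∀ x ∈ cs, x ∈ u := fun x hx => h x (by simp [hx])
      simp only [pvLoopA, List.foldl_cons]
      by_cases hop : (u.take (u.length / 2)).contains c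
      · have hmt : c ∈ u.take (u.length / 2) := by simpa using hop
        have hstate : pvStep (PySem.Set.ofList (u.take (u.length / 2))) (0, stack.length) c
            = (0, (stack ++ [c]).length) := by
          simp [pvStep, hmt]
        rw [if_pos hop, ih _ hrest]
        simp only [hstate]
      · have hmf : c ∉ u.take (u.length / 2) := by simpa using hop
        have hcl : (u.drop (u.length / 2)).contains c := by
          have hmem : c ∈ u.take (u.length / 2) ++ u.drop (u.length / 2) := by
            rw [List.take_append_drop]; exact hcu
          rcases List.mem_append.mp hmem with h1 | h2
          · exact absurd (List.contains_iff_mem.mpr h1) (by simpa using hop)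
          · exact List.contains_iff_mem.mpr h2
        rw [if_neg hop]
        by_cases hs : stack.length > 0
        · have hstate : pvStep (PySem.Set.ofList (u.take (u.length / 2))) (0, stack.length) c
              = (0, stack.dropLast.length) := by
            simp [pvStep, hmf, hs]
          rw [if_pos (by simp [hs, List.contains_iff_mem.mp hcl]), ih _ hrest]
          simp only [hstate]
        · have hstate : pvStep (PySem.Set.ofList (u.take (u.length / 2))) (0, stack.length) c
              = (1, stack.length) := by
            simp [pvStep, hmf, hs]
          have hne : cs.foldl (pvStep (PySem.Set.ofList (u.take (u.length / 2)))) (1, stack.length) ≠ (0, 0) := by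
            intro heq
            have := pv_foldl_fst_mono (PySem.Set.ofList (u.take (u.length / 2))) cs (1, stack.length)
            rw [heq] at this
            simp at this
          rw [if_neg (by simp [hs])]
          simp only [hstate]
          simp [hne]

-- ===== VERDICT (by name: the statement is the Claim_ definition above) =====
theorem is_a_dyck_word_spec : Claim_equal_is_a_dyck_word := by
  intro word _
  unfold Spec_is_a_dyck_word is_a_dyck_word is_a_dyck_word_alt pvGenOpenClose
  simp only [pv_unique_eq]
  rw [pv_loopA_eq (PySem.List.dedup word.toList) word.toList []
      (fun c hc => by simpa [PySem.List.mem_dedup] using hc)]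
  by_cases hw : word = ""
  · subst hw; simp
  · have hne : word.toList ≠ [] := by
      intro hnil
      exact hw (by have h2 := congrArg String.ofList hnil; simpa using h2)
    have hlen : 0 < word.toList.length := List.length_pos_iff.mpr hne
    have hbeq : (word == "") = false := by simpa using hw
    rw [pv_reduce_eq word.toList _ word.toList.length 0 word.toList.length hlen le_rfl (by omega)]
    simp only [List.drop_zero, Nat.sub_zero, List.take_length, List.length_nil, hbeq,
      Bool.false_or]
    rw [Bool.eq_iff_iff]
    simp
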